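-- pv_equiv track=rewrite | github.com/aim-biu-lab/b-ires-test1 | backend/app/services/session_manager.py | _is_next_available_stage
-- ===== SOURCE A (Python) =====
-- from typing import Dict, List, Any, Optional, Tuple
--
-- def _is_next_available_stage(
--
--     target_stage_id: str,
--     completed_stages: List[str],
--     visible_stages: List[str],
-- ) -> bool:
--     """
--     Check if target stage is the next available stage in the sequence.
--     A stage is 'next available' if:
--     - It's in the visible stages
--     - It's the first uncompleted stage in the sequence
--     - All previous stages are completed
--     """
--     if target_stage_id not in visible_stages:
--         return False
--
--     target_index = visible_stages.index(target_stage_id)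
--
--     # Check if all stages before target are completed
--     for i in range(target_index):
--         if visible_stages[i] not in completed_stages:
--             return False
--
--     # Target should be uncompleted (otherwise it's just a completed stage jump)
--     return target_stage_id not in completed_stages
-- ===== SOURCE B (Python) =====
-- def _is_next_available_stage(target_stage_id, completed_stages, visible_stages):
--     done = set(completed_stages)
--     for stage in visible_stages:
--         if stage not in done:
--             return stage == target_stage_id
--     return False
-- ===== Notes on version B (the rewrite author's own statement) =====
-- stated objective: simpler
-- what changed: Replaced A's membership test + .index() + range loop over the prefix + final membership check by one forward scan that stops at the first uncompleted visible stage and compares it with the target, with completed_stages held in a set.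
import Mathlib
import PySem

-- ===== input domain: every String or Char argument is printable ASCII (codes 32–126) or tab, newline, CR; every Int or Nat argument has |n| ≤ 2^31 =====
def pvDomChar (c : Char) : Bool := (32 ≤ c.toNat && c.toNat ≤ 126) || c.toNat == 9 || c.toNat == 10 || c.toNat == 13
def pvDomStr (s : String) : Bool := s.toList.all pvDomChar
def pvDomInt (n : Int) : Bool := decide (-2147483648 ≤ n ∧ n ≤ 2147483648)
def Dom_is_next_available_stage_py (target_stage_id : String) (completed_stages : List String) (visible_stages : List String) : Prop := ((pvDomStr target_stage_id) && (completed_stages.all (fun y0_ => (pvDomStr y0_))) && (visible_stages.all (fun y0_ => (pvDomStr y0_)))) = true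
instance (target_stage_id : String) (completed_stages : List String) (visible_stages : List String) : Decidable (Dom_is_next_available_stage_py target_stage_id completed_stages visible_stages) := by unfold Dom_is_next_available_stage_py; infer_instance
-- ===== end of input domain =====

-- B replaces A's index-lookup + prefix range loop by one forward scan returning (stage == target) at the first uncompleted visible stage (objective: simpler).


-- ===== PORT A =====
def is_next_available_stage_py (target_stage_id : String) (completed_stages : List String) (visible_stages : List String) : Bool :=
  -- if target_stage_id not in visible_stages: return False
  if ¬ (target_stage_id ∈ visible_stages) then false
  else
    -- target_index = visible_stages.index(target_stage_id)  (guard above makes it Some)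
    match PySem.List.index? visible_stages target_stage_id with
    | none => false
    | some target_index =>
      -- for i in range(target_index): if visible_stages[i] not in completed_stages: return False
      -- (i is always a valid index since target_index ≤ len; pyGetD is exact here)
      if (PySem.List.pyRange 0 (target_index : Int) 1).all
           (fun i => decide (PySem.List.pyGetD visible_stages i "" ∈ completed_stages)) then
        decide (¬ (target_stage_id ∈ completed_stages))
      else false


-- ===== PORT B =====
-- scan visible stages in order; at the first uncompleted one, answer stage == target
def altGo (target_stage_id : String) (done : PySem.Set String) : List String → Bool
  | [] => false
  | s :: rest =>
    if PySem.Set.contains done s then altGo target_stage_id done rest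
    else s == target_stage_id

def is_next_available_stage_py_alt (target_stage_id : String) (completed_stages : List String) (visible_stages : List String) : Bool :=
  altGo target_stage_id (PySem.Set.ofList completed_stages) visible_stages


-- ===== PRECONDITION & SPEC =====
def Spec_is_next_available_stage_py (target_stage_id : String) (completed_stages : List String) (visible_stages : List String) (out : Bool) : Prop := out = is_next_available_stage_py_alt target_stage_id completed_stages visible_stages
instance (target_stage_id : String) (completed_stages : List String) (visible_stages : List String) (out : Bool) : Decidable (Spec_is_next_available_stage_py target_stage_id completed_stages visible_stages out) := by unfold Spec_is_next_available_stage_py; infer_instance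

-- ===== CLAIM (what is proved, stated in full; the proofs are below) =====
def Claim_equal_is_next_available_stage_py : Prop := ∀ (target_stage_id : String) (completed_stages : List String) (visible_stages : List String), Dom_is_next_available_stage_py target_stage_id completed_stages visible_stages → Spec_is_next_available_stage_py target_stage_id completed_stages visible_stages (is_next_available_stage_py target_stage_id completed_stages visible_stages)

-- ===== LEMMAS AND PROOFS =====

-- the pyRange/pyGetD prefix scan of A is the scan of the take-k prefix
theorem allRange_take (c v : List String) (k : Nat) (hk : k ≤ v.length) :
    (PySem.List.pyRange 0 (k : Int) 1).all
        (fun i => decide (PySem.List.pyGetD v i "" ∈ c))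
      = (v.take k).all (fun x => decide (x ∈ c)) := by
  induction k with
  | zero => simp
  | succ n ih =>
    have hn : n < v.length := hk
    rw [show ((n+1 : Nat) : Int) = (n : Int) + 1 by push_cast; ring,
        PySem.List.pyRange_one_succ_right (by positivity),
        List.all_append, ih (le_of_lt hn)]
    rw [List.take_add_one, List.all_append, List.getElem?_eq_getElem hn]
    simp [PySem.List.pyGetD_natCast, List.getD_eq_getElem?_getD, List.getElem?_eq_getElem hn]

-- A's value once index? is resolved
def aForm (target_stage_id : String) (completed_stages : List String) (visible_stages : List String) : Bool :=
  match PySem.List.index? visible_stages target_stage_id with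
  | none => false
  | some k =>
    (visible_stages.take k).all (fun x => decide (x ∈ completed_stages))
      && decide (¬ (target_stage_id ∈ completed_stages))

theorem a_eq_aForm (t : String) (c v : List String) :
    is_next_available_stage_py t c v = aForm t c v := by
  unfold is_next_available_stage_py aForm
  by_cases hm : t ∈ v
  · rw [if_neg (not_not_intro hm)]
    obtain ⟨k, hk⟩ := Option.isSome_iff_exists.mp
      ((PySem.List.index?_isSome_iff v t).mpr hm)
    have hkle : k ≤ v.length := by
      obtain ⟨hlt, -, -⟩ := PySem.List.getElem_of_index?_eq_some hk
      exact le_of_lt hlt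
    rw [hk]
    simp only []
    rw [allRange_take c v k hkle]
    by_cases h : (v.take k).all (fun x => decide (x ∈ c)) = true
    · rw [if_pos h, h, Bool.true_and]
    · rw [if_neg h, eq_comm, Bool.and_eq_false_iff]
      exact Or.inl (Bool.eq_false_iff.mpr h)
  · rw [if_pos hm, (PySem.List.index?_eq_none_iff v t).mpr hm]

theorem contains_ofList_eq (c : List String) (s : String) :
    (PySem.Set.ofList c).contains s = decide (s ∈ c) := by
  by_cases h : s ∈ c
  · rw [(PySem.Set.contains_iff _ s).mpr ((PySem.Set.mem_ofList c s).mpr h)]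
    simp [h]
  · have : ¬ ((PySem.Set.ofList c).contains s = true) := by
      intro hc
      exact h ((PySem.Set.mem_ofList c s).mp ((PySem.Set.contains_iff _ s).mp hc))
    simp [h]

-- once the target itself is completed, the scan can never answer true
theorem altGo_of_mem_done (t : String) (c : List String) (ht : t ∈ c) :
    ∀ l, altGo t (PySem.Set.ofList c) l = false := by
  intro l
  induction l with
  | nil => rfl
  | cons s rest ih =>
    unfold altGo
    rw [contains_ofList_eq]
    by_cases hs : s ∈ c
    · simp [hs, ih]
    · have hne : s ≠ t := fun h => hs (h ▸ ht)
      simp [hs, hne]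

theorem altGo_eq_aForm (t : String) (c : List String) :
    ∀ v, altGo t (PySem.Set.ofList c) v = aForm t c v := by
  intro v
  induction v with
  | nil => rfl
  | cons s rest ih =>
    unfold altGo
    rw [contains_ofList_eq]
    by_cases hst : s = t
    · subst hst
      unfold aForm
      rw [PySem.List.index?_cons_self]
      by_cases hc : s ∈ c
      · simp [hc, altGo_of_mem_done s c hc rest]
      · simp [hc]
    · unfold aForm
      rw [PySem.List.index?_cons_of_ne rest hst]
      by_cases hc : s ∈ c
      · rw [if_pos (by simp [hc]), ih]
        unfold aForm
        cases h : PySem.List.index? rest t with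
        | none => simp
        | some k => simp [List.take_succ_cons, hc]
      · rw [if_neg (by simp [hc])]
        cases h : PySem.List.index? rest t with
        | none => simp [hst]
        | some k => simp [List.take_succ_cons, hc, hst]

-- ===== VERDICT (by name: the statement is the Claim_ definition above) =====
theorem is_next_available_stage_py_spec : Claim_equal_is_next_available_stage_py := by
  intro t c v _
  unfold Spec_is_next_available_stage_py is_next_available_stage_py_alt
  rw [a_eq_aForm, altGo_eq_aForm]
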